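-- pv_equiv track=rewrite | github.com/jiahaoxu14/FeatureWind | backend/src/featurewind/analysis/seeds_visual_sensitivity.py | resolve_feature_index
-- ===== SOURCE A (Python) =====
-- def resolve_feature_index(feature_names: list[str], feature_name: str) -> int:
--     target = str(feature_name).strip().lower()
--     exact_matches = [idx for idx, name in enumerate(feature_names) if str(name).strip().lower() == target]
--     if len(exact_matches) == 1:
--         return int(exact_matches[0])
--     if len(exact_matches) > 1:
--         raise ValueError(f"Feature name {feature_name!r} matched multiple columns.")
--
--     substring_matches = [idx for idx, name in enumerate(feature_names) if target in str(name).strip().lower()]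
--     if len(substring_matches) == 1:
--         return int(substring_matches[0])
--     if len(substring_matches) > 1:
--         raise ValueError(f"Feature name {feature_name!r} is ambiguous across columns.")
--     raise ValueError(f"Feature name {feature_name!r} was not found.")
-- ===== SOURCE B (Python) =====
-- def resolve_feature_index(feature_names: list[str], feature_name: str) -> int:
--     target = str(feature_name).strip().lower()
--     exact_count = 0
--     exact_idx = -1
--     sub_count = 0
--     sub_idx = -1
--     for idx, name in enumerate(feature_names):
--         norm = str(name).strip().lower()
--         if norm == target:
--             if exact_count == 0:
--                 exact_idx = idx
--             exact_count += 1
--         if target in norm: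
--             if sub_count == 0:
--                 sub_idx = idx
--             sub_count += 1
--     if exact_count == 1:
--         return exact_idx
--     if exact_count > 1:
--         raise ValueError(f"Feature name {feature_name!r} matched multiple columns.")
--     if sub_count == 1:
--         return sub_idx
--     if sub_count > 1:
--         raise ValueError(f"Feature name {feature_name!r} is ambiguous across columns.")
--     raise ValueError(f"Feature name {feature_name!r} was not found.")
-- ===== Notes on version B (the rewrite author's own statement) =====
-- stated objective: alternative
-- what changed: Replaced the two list comprehensions (which build full index lists and may rescan the list a second time) by a single pass that keeps only four scalars: exact/substring match counters and the first matching index of each kind, then applies the same decision ladder.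
import Mathlib
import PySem

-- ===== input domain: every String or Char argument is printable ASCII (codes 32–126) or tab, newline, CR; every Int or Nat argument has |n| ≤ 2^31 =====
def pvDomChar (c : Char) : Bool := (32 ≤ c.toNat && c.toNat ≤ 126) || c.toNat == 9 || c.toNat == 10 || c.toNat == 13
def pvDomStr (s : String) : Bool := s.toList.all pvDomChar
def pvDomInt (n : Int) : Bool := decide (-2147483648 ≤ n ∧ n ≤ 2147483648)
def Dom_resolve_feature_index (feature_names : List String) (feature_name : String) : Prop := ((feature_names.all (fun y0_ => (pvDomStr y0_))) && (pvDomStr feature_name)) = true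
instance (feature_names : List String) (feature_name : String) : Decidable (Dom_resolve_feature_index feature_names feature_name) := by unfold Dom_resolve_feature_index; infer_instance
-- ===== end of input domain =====

-- B replaces A's two list comprehensions by a single pass keeping only match counters and first-match indices (same results, O(1) extra space).


-- ===== PORT A =====
-- str(name).strip().lower()
def pvNormA (s : String) : String := PySem.Str.lower (PySem.Str.strip s)

def resolve_feature_index (feature_names : List String) (feature_name : String) : Int :=
  let target := pvNormA feature_name
  let exact_matches := ((PySem.List.enumerate feature_names).filter
      (fun p => pvNormA p.2 == target)).map (·.1)
  if exact_matches.length = 1 then PySem.List.pyGetD exact_matches 0 0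
  else if exact_matches.length > 1 then 0   -- raise ValueError "matched multiple columns": outside Pre_
  else
    let substring_matches := ((PySem.List.enumerate feature_names).filter
        (fun p => PySem.Str.isIn target (pvNormA p.2))).map (·.1)
    if substring_matches.length = 1 then PySem.List.pyGetD substring_matches 0 0
    else 0   -- raise ValueError ("ambiguous" / "was not found"): outside Pre_

-- ===== PORT B =====
-- the single loop of Source B: state (exact_count, exact_idx, sub_count, sub_idx)
def pvScanB (t : String) : List (Int × String) → Int × Int × Int × Int → Int × Int × Int × Int
  | [], st => st
  | (idx, name) :: rest, (ec, ei, sc, si) =>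
    let nm := PySem.Str.lower (PySem.Str.strip name)
    let st1 : Int × Int := if nm == t then (ec + 1, if ec == 0 then idx else ei) else (ec, ei)
    let st2 : Int × Int := if PySem.Str.isIn t nm then (sc + 1, if sc == 0 then idx else si) else (sc, si)
    pvScanB t rest (st1.1, st1.2, st2.1, st2.2)

def resolve_feature_index_alt (feature_names : List String) (feature_name : String) : Int :=
  let target := PySem.Str.lower (PySem.Str.strip feature_name)
  let st := pvScanB target (PySem.List.enumerate feature_names) (0, -1, 0, -1)
  if st.1 = 1 then st.2.1
  else if st.1 > 1 then 0   -- raise "matched multiple columns": outside Pre_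
  else if st.2.2.1 = 1 then st.2.2.2
  else 0   -- raise "ambiguous" / "was not found": outside Pre_

-- ===== PRECONDITION & SPEC =====
-- Pre_ excludes exactly the inputs on which A raises ValueError: no unique exact match and no unique substring match.
def Pre_resolve_feature_index (feature_names : List String) (feature_name : String) : Prop :=
  let target := PySem.Str.lower (PySem.Str.strip feature_name)
  let e := feature_names.countP (fun n => PySem.Str.lower (PySem.Str.strip n) == target)
  let s := feature_names.countP (fun n => PySem.Str.isIn target (PySem.Str.lower (PySem.Str.strip n)))
  e = 1 ∨ (e = 0 ∧ s = 1)
instance (feature_names : List String) (feature_name : String) : Decidable (Pre_resolve_feature_index feature_names feature_name) := by unfold Pre_resolve_feature_index; infer_instance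

def pvWitness_resolve_feature_index : List String × String := (["alpha", "beta"], " Alpha ")

def Spec_resolve_feature_index (feature_names : List String) (feature_name : String) (out : Int) : Prop := out = resolve_feature_index_alt feature_names feature_name
instance (feature_names : List String) (feature_name : String) (out : Int) : Decidable (Spec_resolve_feature_index feature_names feature_name out) := by unfold Spec_resolve_feature_index; infer_instance

-- ===== CLAIM (what is proved, stated in full; the proofs are below) =====
def Claim_equal_resolve_feature_index : Prop := ∀ (feature_names : List String) (feature_name : String), Dom_resolve_feature_index feature_names feature_name → Pre_resolve_feature_index feature_names feature_name → Spec_resolve_feature_index feature_names feature_name (resolve_feature_index feature_names feature_name)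

-- ===== LEMMAS AND PROOFS =====

-- first index of a filtered pair list, with default
def pvHeadIdx (l : List (Int × String)) (d : Int) : Int :=
  match l with
  | [] => d
  | p :: _ => p.1

set_option maxHeartbeats 1000000 in
lemma pvScanB_spec (t : String) (l : List (Int × String)) (ec ei sc si : Int)
    (hec : 0 ≤ ec) (hsc : 0 ≤ sc) :
    pvScanB t l (ec, ei, sc, si) =
      (ec + (l.countP (fun p => PySem.Str.lower (PySem.Str.strip p.2) == t)),
       (if ec = 0 then pvHeadIdx (l.filter (fun p => PySem.Str.lower (PySem.Str.strip p.2) == t)) ei else ei),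
       sc + (l.countP (fun p => PySem.Str.isIn t (PySem.Str.lower (PySem.Str.strip p.2)))),
       (if sc = 0 then pvHeadIdx (l.filter (fun p => PySem.Str.isIn t (PySem.Str.lower (PySem.Str.strip p.2)))) si else si)) := by
  induction l generalizing ec ei sc si with
  | nil => simp [pvScanB, pvHeadIdx]
  | cons p rest ih =>
    obtain ⟨idx, name⟩ := p
    by_cases h1 : (PySem.Str.lower (PySem.Str.strip name) == t) = true <;>
      by_cases h2 : (PySem.Str.isIn t (PySem.Str.lower (PySem.Str.strip name))) = true <;>
        (simp only [pvScanB, h1, h2, ite_true, ite_false, Bool.false_eq_true, beq_iff_eq]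
         rw [ih _ _ _ _ (by omega) (by omega)]
         simp only [List.countP_cons, List.filter_cons, h1, h2, ite_true, ite_false,
           Bool.false_eq_true, Prod.mk.injEq]
         refine ⟨?_, ?_, ?_, ?_⟩ <;>
           first
             | exact True.intro
             | (push_cast; omega)
             | (split_ifs <;> first | rfl | (exfalso; omega)))

lemma pvCountP_enumerate_snd (fns : List String) (q : String → Bool) (s : Int) :
    (PySem.List.enumerate fns s).countP (fun p => q p.2) = fns.countP q := by
  conv_rhs => rw [← PySem.List.map_snd_enumerate fns s]
  rw [List.countP_map]; rfl

set_option maxHeartbeats 2000000 in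
theorem resolve_feature_index_spec : Claim_equal_resolve_feature_index := by
  intro fns fn _ hpre
  unfold Spec_resolve_feature_index resolve_feature_index resolve_feature_index_alt pvNormA
  unfold Pre_resolve_feature_index at hpre
  simp only at hpre ⊢
  rw [pvScanB_spec _ _ 0 (-1) 0 (-1) le_rfl le_rfl]
  rcases hpre with h1 | ⟨h0, hs1⟩
  · -- exactly one exact match
    have h1' : List.countP (fun p : Int × String => PySem.Str.lower (PySem.Str.strip p.2) == PySem.Str.lower (PySem.Str.strip fn)) (PySem.List.enumerate fns) = 1 :=
      (pvCountP_enumerate_snd fns (fun n => PySem.Str.lower (PySem.Str.strip n) == PySem.Str.lower (PySem.Str.strip fn)) 0).trans h1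
    obtain ⟨p, hp⟩ := List.length_eq_one_iff.mp ((List.countP_eq_length_filter ..).symm.trans h1')
    simp [h1', hp, pvHeadIdx, PySem.List.pyGetD, PySem.List.pyGet?, PySem.List.pyIdx?]
  · -- no exact match, exactly one substring match
    have h0' : List.countP (fun p : Int × String => PySem.Str.lower (PySem.Str.strip p.2) == PySem.Str.lower (PySem.Str.strip fn)) (PySem.List.enumerate fns) = 0 :=
      (pvCountP_enumerate_snd fns (fun n => PySem.Str.lower (PySem.Str.strip n) == PySem.Str.lower (PySem.Str.strip fn)) 0).trans h0
    have hs1' : List.countP (fun p : Int × String => PySem.Str.isIn (PySem.Str.lower (PySem.Str.strip fn)) (PySem.Str.lower (PySem.Str.strip p.2))) (PySem.List.enumerate fns) = 1 :=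
      (pvCountP_enumerate_snd fns (fun n => PySem.Str.isIn (PySem.Str.lower (PySem.Str.strip fn)) (PySem.Str.lower (PySem.Str.strip n))) 0).trans hs1
    obtain ⟨q, hq⟩ := List.length_eq_one_iff.mp ((List.countP_eq_length_filter ..).symm.trans hs1')
    have h0f := List.length_eq_zero_iff.mp ((List.countP_eq_length_filter ..).symm.trans h0')
    simp only [List.countP_eq_length_filter, h0f, hq]
    simp [pvHeadIdx, PySem.List.pyGetD, PySem.List.pyGet?, PySem.List.pyIdx?]
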